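-- pv_equiv track=rewrite | github.com/Valentino1994/dayAlgorithm | onedayAlgorithm/2022/01_January/4th/s1.py | solution
-- ===== SOURCE A (Python) =====
-- def solution(N, Arr):
--     answer = 0
--
--     arr = sorted(Arr)[::-1]
--     idx = 0
--
--     while idx < N:
--         idx += arr[idx]
--         answer += 1
--
--     return answer
-- ===== SOURCE B (Python) =====
-- def solution(N, Arr):
--     arr = sorted(Arr, reverse=True)
--     answer = 0
--     cnt = 0
--     target = 0
--     for i, x in enumerate(arr):
--         if i >= N:
--             break
--         if cnt == 0:
--             target = x
--         cnt += 1
--         if cnt == target: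
--             answer += 1
--             cnt = 0
--     if cnt > 0:
--         answer += 1
--     return answer
-- ===== Notes on version B (the rewrite author's own statement) =====
-- stated objective: alternative
-- what changed: Replaces A's while-loop that jumps idx forward by arr[idx] (group-to-group hops, out-of-range when it jumps wrong) with one total linear left-to-right scan that counts members of the current group with a cnt/target pair and adds one for a trailing partial group.
-- outside the precondition, e.g. on solution(3, [2, 2, -1]): A returns 3, B returns 2; on solution(6, [3, 3, 3, 3]): A returns 2, B returns 2; on solution(1, []): A raises IndexError, B returns 0
import Mathlib
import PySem

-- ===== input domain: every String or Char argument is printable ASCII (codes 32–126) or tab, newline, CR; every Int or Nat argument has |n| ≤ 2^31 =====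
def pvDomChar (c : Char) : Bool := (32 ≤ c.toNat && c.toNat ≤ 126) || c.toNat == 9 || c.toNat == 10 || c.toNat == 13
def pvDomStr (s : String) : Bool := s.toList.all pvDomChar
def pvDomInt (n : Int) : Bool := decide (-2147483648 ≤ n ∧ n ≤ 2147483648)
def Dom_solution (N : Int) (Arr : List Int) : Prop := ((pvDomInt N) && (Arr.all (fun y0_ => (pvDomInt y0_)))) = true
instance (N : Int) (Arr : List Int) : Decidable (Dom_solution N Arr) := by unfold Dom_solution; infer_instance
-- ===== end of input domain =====

-- B replaces A's idx-jumping while loop by one total linear scan with a member counter; objective: alternative decomposition (same cost).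

-- ===== PORT A =====
-- A's 'while idx < N' loop; fuel N.toNat is a totality device only: inside Pre_ the loop
-- runs at most N times (every jump taken is ≥ 1, or the very first jump already exits).
-- 'none' (IndexError) is outside Pre_.
def pvSolLoop (fuel : Nat) (N : Int) (arr : List Int) (idx answer : Int) : Int :=
  match fuel with
  | 0 => answer
  | fuel + 1 =>
    if idx < N then
      match PySem.List.pyGet? arr idx with
      | some v => pvSolLoop fuel N arr (idx + v) (answer + 1)
      | none => answer
    else answer

def solution (N : Int) (Arr : List Int) : Int :=
  -- arr = sorted(Arr)[::-1]
  let arr := match PySem.List.slice? (PySem.List.sorted Arr (fun x => x) false) none none (-1) with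
    | some l => l
    | none => []
  pvSolLoop N.toNat N arr 0 0

-- ===== PORT B =====
-- body of B's loop; state = (answer, cnt, target)
def pvStep (s : Int × Int × Int) (x : Int) : Int × Int × Int :=
  let target := if s.2.1 = 0 then x else s.2.2
  let cnt := s.2.1 + 1
  if cnt = target then (s.1 + 1, 0, target) else (s.1, cnt, target)

-- B's 'for i, x in enumerate(arr): if i >= N: break; …' loop
def pvScanB (N : Int) (i : Nat) (l : List Int) (s : Int × Int × Int) : Int × Int × Int :=
  match l with
  | [] => s
  | x :: xs => if (i : Int) < N then pvScanB N (i + 1) xs (pvStep s x) else s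

def solution_alt (N : Int) (Arr : List Int) : Int :=
  let arr := PySem.List.sorted Arr (fun x => x) true
  let s := pvScanB N 0 arr (0, 0, 0)
  s.1 + (if s.2.1 > 0 then 1 else 0)

-- ===== PRECONDITION & SPEC =====
-- Pre_ is the closed-form region on which A's index-jumping loop provably returns: N ≤ 0
-- (loop never runs), or some element is ≥ N (the very first jump from the descending
-- head exits), or Arr has at least N positive elements (every jump advances in bounds).
-- Outside it A raises IndexError or diverges on most inputs (e.g. (1, []) raises,
-- (2, [1, 0]) loops forever), though A does still return on some excluded inputs where
-- its jump lands on a negative entry or skips past the end of the array; see the cites.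
def Pre_solution (N : Int) (Arr : List Int) : Prop :=
  N ≤ 0 ∨ N ≤ (Arr.countP (fun x => decide (0 < x)) : Int) ∨ ∃ x ∈ Arr, N ≤ x
instance (N : Int) (Arr : List Int) : Decidable (Pre_solution N Arr) := by unfold Pre_solution; infer_instance

def pvWitness_solution : Int × List Int := (2, [1, 2, 5])

def Spec_solution (N : Int) (Arr : List Int) (out : Int) : Prop := out = solution_alt N Arr
instance (N : Int) (Arr : List Int) (out : Int) : Decidable (Spec_solution N Arr out) := by unfold Spec_solution; infer_instance

-- ===== CLAIM (what is proved, stated in full; the proofs are below) =====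
def Claim_equal_solution : Prop := ∀ (N : Int) (Arr : List Int), Dom_solution N Arr → Pre_solution N Arr → Spec_solution N Arr (solution N Arr)

-- ===== LEMMAS AND PROOFS =====

-- B's scan result from an arbitrary state, over an explicit element list
def pvResS (l : List Int) (s : Int × Int × Int) : Int :=
  let r := l.foldl pvStep s
  r.1 + (if r.2.1 > 0 then 1 else 0)

-- the two sort expressions produce the same list
lemma pv_sorted_rev_eq (Arr : List Int) :
    (PySem.List.sorted Arr (fun x => x) false).reverse = PySem.List.sorted Arr (fun x => x) true := by
  apply PySem.List.eq_of_perm_of_pairwise_le_of_injective (fun x : Int => -x)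
    (fun a b h => by simp only [neg_inj] at h; exact h)
  · exact (List.reverse_perm _).trans
      ((PySem.List.sorted_perm Arr _ false).trans (PySem.List.sorted_perm Arr _ true).symm)
  · rw [List.pairwise_reverse]
    exact (PySem.List.sorted_pairwise Arr (fun x => x)).imp (fun h => by omega)
  · exact (PySem.List.sorted_pairwise_rev Arr (fun x => x)).imp (fun h => by omega)

-- B's indexed loop with break is the fold over the prefix of length N - i
lemma pv_scanB_eq_take (N : Int) (l : List Int) : ∀ (i : Nat) (s : Int × Int × Int),
    pvScanB N i l s = (l.take (N.toNat - i)).foldl pvStep s := by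
  induction l with
  | nil => intro i s; simp [pvScanB]
  | cons x xs ih =>
    intro i s
    by_cases h : (i : Int) < N
    · have h1 : N.toNat - i = (N.toNat - (i + 1)) + 1 := by omega
      simp only [pvScanB, if_pos h, ih (i + 1), h1, List.take_succ_cons, List.foldl_cons]
    · have h0 : N.toNat - i = 0 := by omega
      simp [pvScanB, if_neg h, h0]

-- A's loop returns its accumulator as soon as idx ≥ N
lemma pv_loop_stop (fuel : Nat) (N : Int) (arr : List Int) (idx ans : Int) (h : ¬ idx < N) :
    pvSolLoop fuel N arr idx ans = ans := by
  cases fuel with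
  | zero => rfl
  | succ fuel => simp [pvSolLoop, h]

-- descending order + at least n positives ⇒ the first n entries are positive
lemma pv_pos_prefix (arr : List Int) (n : Nat)
    (hdesc : arr.Pairwise (fun a b => b ≤ a))
    (hcnt : n ≤ arr.countP (fun x => decide (0 < x))) :
    ∀ i (hi : i < n), 0 < arr[i]'(lt_of_lt_of_le hi (le_trans hcnt List.countP_le_length)) := by
  intro i hi
  by_contra hle
  push_neg at hle
  have hilen : i < arr.length := lt_of_lt_of_le hi (le_trans hcnt List.countP_le_length)
  have hdrop : (arr.drop i).countP (fun x => decide (0 < x)) = 0 := by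
    rw [List.countP_eq_zero]
    intro a ha
    obtain ⟨k, hk, hak⟩ := List.mem_iff_getElem.mp ha
    have hlendrop : (arr.drop i).length = arr.length - i := List.length_drop
    have hk' : i + k < arr.length := by omega
    have hget : (arr.drop i)[k]'hk = arr[i + k]'hk' := by
      simp [List.getElem_drop]
    have hmono : arr[i + k]'hk' ≤ arr[i]'hilen := by
      rcases Nat.eq_zero_or_pos k with hk0 | hk0
      · subst hk0; simp
      · exact List.pairwise_iff_getElem.mp hdesc i (i + k) hilen hk' (by omega)
    rw [← hak, hget]
    simp only [decide_eq_true_eq, not_lt]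
    omega
  have hsplit : arr.countP (fun x => decide (0 < x))
      = (arr.take i).countP (fun x => decide (0 < x)) + (arr.drop i).countP (fun x => decide (0 < x)) := by
    rw [← List.countP_append, List.take_append_drop]
  have htake : (arr.take i).countP (fun x => decide (0 < x)) ≤ i := by
    calc (arr.take i).countP _ ≤ (arr.take i).length := List.countP_le_length
    _ ≤ i := List.length_take_le _ _
  omega

-- one scan step from a mid-group state (cnt ≠ 0)
lemma pv_step_mid (ans c t x : Int) (hc0 : ¬ c = 0) :
    pvStep (ans, c, t) x = if c + 1 = t then (ans + 1, 0, t) else (ans, c + 1, t) := by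
  simp [pvStep, hc0]

-- one scan step from a fresh state (cnt = 0): start a group with target x
lemma pv_step_fresh (ans t0 x : Int) :
    pvStep (ans, 0, t0) x = if (1 : Int) = x then (ans + 1, 0, x) else (ans, 1, x) := by
  simp [pvStep]

-- a mid-group scan whose whole remainder fits inside the current group yields one more group
lemma pv_mid_short (l : List Int) : ∀ (ans c t : Int), 0 < c → c + (l.length : Int) ≤ t →
    pvResS l (ans, c, t) = ans + 1 := by
  induction l with
  | nil => intro ans c t hc _; simp [pvResS, hc]
  | cons x xs ih =>
    intro ans c t hc hlen
    simp only [List.length_cons] at hlen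
    have hstep : (x :: xs).foldl pvStep (ans, c, t)
        = xs.foldl pvStep (if c + 1 = t then (ans + 1, 0, t) else (ans, c + 1, t)) := by
      simp [pv_step_mid ans c t x (by omega)]
    by_cases hdone : c + 1 = t
    · have hnil : xs = [] := by
        have : (xs.length : Int) ≤ 0 := by push_cast at hlen ⊢; omega
        simpa using List.length_eq_zero_iff.mp (by omega)
      subst hnil
      simp [pvResS, hstep, hdone]
    · have : pvResS (x :: xs) (ans, c, t) = pvResS xs (ans, c + 1, t) := by
        simp only [pvResS, hstep, if_neg hdone]
      rw [this]
      exact ih ans (c + 1) t (by omega) (by push_cast at hlen ⊢; omega)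

-- inner scan: with 0 < cnt < target, the scan finishes the current group after target-cnt elements
lemma pv_inner (l : List Int) : ∀ (ans c t : Int), 0 < c → c < t →
    pvResS l (ans, c, t) = pvResS (l.drop (t - c).toNat) (ans + 1, 0, t) := by
  induction l with
  | nil => intro ans c t hc hct; simp [pvResS, hc]
  | cons x l ih =>
    intro ans c t hc hct
    have hstep : (x :: l).foldl pvStep (ans, c, t)
        = l.foldl pvStep (if c + 1 = t then (ans + 1, 0, t) else (ans, c + 1, t)) := by
      simp [pv_step_mid ans c t x (by omega)]
    by_cases hdone : c + 1 = t
    · have h1 : (t - c).toNat = 1 := by omega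
      simp only [pvResS, hstep, if_pos hdone, h1, List.drop_succ_cons, List.drop_zero]
    · have hstep' : (x :: l).foldl pvStep (ans, c, t) = l.foldl pvStep (ans, c + 1, t) := by
        rw [hstep, if_neg hdone]
      have hd : (x :: l).drop (t - c).toNat = l.drop (t - (c + 1)).toNat := by
        have h1 : (t - c).toNat = (t - (c + 1)).toNat + 1 := by omega
        rw [h1]; simp
      calc pvResS (x :: l) (ans, c, t)
          = pvResS l (ans, c + 1, t) := by simp only [pvResS, hstep']
        _ = pvResS (l.drop (t - (c + 1)).toNat) (ans + 1, 0, t) := ih ans (c + 1) t (by omega) (by omega)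
        _ = pvResS ((x :: l).drop (t - c).toNat) (ans + 1, 0, t) := by rw [hd]

-- outer correspondence: A's jump loop from index idx equals B's scan over (take n arr).drop idx
lemma pv_outer (N : Int) (arr : List Int)
    (hlen : N.toNat ≤ arr.length)
    (hpos : ∀ i (hi : i < N.toNat), 0 < arr[i]'(lt_of_lt_of_le hi hlen)) :
    ∀ (fuel : Nat) (idx : Nat) (ans t0 : Int), N.toNat - idx ≤ fuel →
      pvSolLoop fuel N arr (idx : Int) ans = pvResS ((arr.take N.toNat).drop idx) (ans, 0, t0) := by
  intro fuel
  induction fuel with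
  | zero =>
    intro idx ans t0 hf
    have hnil : (arr.take N.toNat).drop idx = [] := by
      apply List.drop_eq_nil_of_le
      calc (arr.take N.toNat).length ≤ N.toNat := List.length_take_le _ _
      _ ≤ idx := by omega
    simp [pvSolLoop, hnil, pvResS]
  | succ fuel ih =>
    intro idx ans t0 hf
    by_cases hlt : (idx : Int) < N
    · have hidx : idx < N.toNat := by omega
      have hidxlen : idx < arr.length := lt_of_lt_of_le hidx hlen
      have hget : PySem.List.pyGet? arr (idx : Int) = some (arr[idx]'hidxlen) := by
        rw [PySem.List.pyGet?_natCast]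
        simp [List.getElem?_eq_getElem hidxlen]
      set v := arr[idx]'hidxlen with hv
      clear_value v
      have hvpos : 0 < v := hv ▸ hpos idx hidx
      have hvnat : 1 ≤ v.toNat := by omega
      have hstepA : pvSolLoop (fuel + 1) N arr (idx : Int) ans
          = pvSolLoop fuel N arr ((idx : Int) + v) (ans + 1) := by
        simp [pvSolLoop, hlt, hget]
      have hcast : ((idx : Int) + v) = ((idx + v.toNat : Nat) : Int) := by push_cast; omega
      have hfin : N.toNat - (idx + v.toNat) ≤ fuel := by omega
      rw [hstepA, hcast, ih (idx + v.toNat) (ans + 1) v hfin]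
      -- RHS: the scan from idx first consumes the group of size v
      have hcons : (arr.take N.toNat).drop idx = v :: ((arr.take N.toNat).drop (idx + 1)) := by
        have hlt' : idx < (arr.take N.toNat).length := by
          rw [List.length_take]; omega
        rw [List.drop_eq_getElem_cons hlt']
        congr 1
        rw [List.getElem_take]
        exact hv.symm
      rw [hcons]
      have hfirst : pvResS (v :: (arr.take N.toNat).drop (idx + 1)) (ans, 0, t0)
          = pvResS ((arr.take N.toNat).drop (idx + 1))
              (if (1 : Int) = v then (ans + 1, 0, v) else (ans, 1, v)) := by
        simp only [pvResS, List.foldl_cons, pv_step_fresh]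
      rw [hfirst]
      by_cases hone : (1 : Int) = v
      · rw [if_pos hone]
        have he : idx + v.toNat = idx + 1 := by omega
        rw [he]
      · rw [if_neg hone]
        rw [pv_inner _ ans 1 v (by omega) (by omega)]
        rw [List.drop_drop]
        have he : idx + 1 + (v - 1).toNat = idx + v.toNat := by omega
        rw [he]
    · have hnil : (arr.take N.toNat).drop idx = [] := by
        apply List.drop_eq_nil_of_le
        calc (arr.take N.toNat).length ≤ N.toNat := List.length_take_le _ _
        _ ≤ idx := by omega
      simp [pvSolLoop, hlt, hnil, pvResS]

-- ===== VERDICT (by name: the statement is the Claim_ definition above) =====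
theorem solution_spec : Claim_equal_solution := by
  intro N Arr _hDom hPre
  unfold Spec_solution solution solution_alt
  rw [PySem.List.slice?_none_none_neg_one]
  simp only []
  rw [pv_sorted_rev_eq Arr]
  set arr := PySem.List.sorted Arr (fun x => x) true with harr
  have hperm : arr.Perm Arr := PySem.List.sorted_perm Arr _ true
  have hdesc : arr.Pairwise (fun a b => b ≤ a) := PySem.List.sorted_pairwise_rev Arr (fun x => x)
  rw [pv_scanB_eq_take]
  simp only [Nat.sub_zero]
  by_cases hN0 : N ≤ 0
  · -- the loop never runs, the scan prefix is empty
    have h0 : N.toNat = 0 := by omega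
    simp [h0, pvSolLoop, pvResS]
  · push_neg at hN0
    rcases hPre with hle0 | hcnt | ⟨x, hx, hxN⟩
    · omega
    · -- at least N positive elements: the general group correspondence
      have hcnt' : N.toNat ≤ arr.countP (fun x => decide (0 < x)) := by
        rw [hperm.countP_eq]; omega
      have hlen : N.toNat ≤ arr.length := le_trans hcnt' List.countP_le_length
      have hpos := pv_pos_prefix arr N.toNat hdesc hcnt'
      have houter := pv_outer N arr hlen hpos N.toNat 0 0 0 (by omega)
      simp only [Nat.cast_zero, List.drop_zero] at houter
      exact houter
    · -- some element ≥ N: both sides give 1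
      obtain ⟨h, t, hht⟩ : ∃ h t, arr = h :: t := by
        cases harr' : arr with
        | nil =>
          exfalso
          have := hperm.mem_iff.mpr hx
          rw [harr'] at this
          exact absurd this (List.not_mem_nil)
        | cons h t => exact ⟨h, t, rfl⟩
      have hxarr : x ∈ arr := hperm.mem_iff.mpr hx
      have hhead : N ≤ h := by
        rw [hht] at hxarr hdesc
        rcases List.mem_cons.mp hxarr with rfl | hxt
        · exact hxN
        · exact le_trans hxN ((List.pairwise_cons.mp hdesc).1 x hxt)
      -- A side: one jump of size h ≥ N exits
      have hA : pvSolLoop N.toNat N arr 0 0 = 1 := by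
        obtain ⟨m, hm⟩ : ∃ m, N.toNat = m + 1 := ⟨N.toNat - 1, by omega⟩
        rw [hm, hht]
        have hget : PySem.List.pyGet? (h :: t) (0 : Int) = some h := by
          rw [show (0 : Int) = ((0 : Nat) : Int) by norm_num, PySem.List.pyGet?_natCast]
          rfl
        simp only [pvSolLoop, if_pos hN0, hget]
        exact pv_loop_stop m N (h :: t) (0 + h) 1 (by omega)
      -- B side: the whole scanned prefix is one (possibly partial) group of target h
      have hB : pvResS (arr.take N.toNat) (0, 0, 0) = 1 := by
        rw [hht]
        obtain ⟨m, hm⟩ : ∃ m, N.toNat = m + 1 := ⟨N.toNat - 1, by omega⟩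
        rw [hm, List.take_succ_cons]
        have hfirst : pvResS (h :: t.take m) ((0 : Int), (0 : Int), (0 : Int))
            = pvResS (t.take m) (if (1 : Int) = h then (0 + 1, 0, h) else (0, 1, h)) := by
          simp only [pvResS, List.foldl_cons, pv_step_fresh]
        rw [hfirst]
        by_cases hone : (1 : Int) = h
        · have hm0 : m = 0 := by omega
          simp [hone, hm0, pvResS]
        · rw [if_neg hone]
          apply pv_mid_short
          · omega
          · have : (t.take m).length ≤ m := List.length_take_le _ _
            have : ((t.take m).length : Int) ≤ (m : Int) := by exact_mod_cast this
            omega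
      rw [hA]; exact hB.symm
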